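-- pv_equiv track=rewrite | github.com/makfly10/python-course | 02.1.DataStructures/min_to_drop/min_to_drop.py | get_min_to_drop
-- ===== SOURCE A (Python) =====
-- import typing as tp
-- from collections import Counter
--
-- def get_min_to_drop(seq: tp.Sequence[tp.Any]) -> int:
--     """
--     :param seq: sequence of elements
--     :return: number of elements need to drop to leave equal elements
--     """
--     if seq == [] or len(seq) == 1:
--         return 0
--     counter_seq = Counter(seq)
--     count_drop = 0
--     max_value = 0
--     for key, value in counter_seq.items():
--         if value > max_value:
--             max_value = value
--     return len(seq) - max_value
-- ===== SOURCE B (Python) =====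
-- def get_min_to_drop(seq):
--     """
--     :param seq: sequence of elements
--     :return: number of elements need to drop to leave equal elements
--     """
--     s = sorted(seq)
--     best = run = 0
--     prev = object()  # sentinel, equal to nothing in s
--     for x in s:
--         run = run + 1 if x == prev else 1
--         if run > best:
--             best = run
--         prev = x
--     return len(s) - best
-- ===== Notes on version B (the rewrite author's own statement) =====
-- stated objective: alternative
-- what changed: Replaces the frequency-table (Counter) approach by sort-then-scan: sort the sequence so equal elements become adjacent, take the longest run of equal adjacent elements in one pass, and subtract it from the length; no counting structure is built.
import Mathlib
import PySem

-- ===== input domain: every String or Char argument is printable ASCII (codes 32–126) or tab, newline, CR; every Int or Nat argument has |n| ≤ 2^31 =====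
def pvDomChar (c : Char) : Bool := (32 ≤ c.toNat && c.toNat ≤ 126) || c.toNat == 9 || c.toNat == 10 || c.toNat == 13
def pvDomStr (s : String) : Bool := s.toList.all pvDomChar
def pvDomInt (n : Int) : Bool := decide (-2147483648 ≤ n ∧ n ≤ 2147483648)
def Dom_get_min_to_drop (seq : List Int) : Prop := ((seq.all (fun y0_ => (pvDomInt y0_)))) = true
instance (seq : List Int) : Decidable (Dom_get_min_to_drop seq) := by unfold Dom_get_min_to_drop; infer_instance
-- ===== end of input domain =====

-- B sorts the sequence and takes the longest run of equal adjacent elements instead of building a frequency table.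


-- ===== PORT A =====
def get_min_to_drop (seq : List Int) : Int :=
  if seq = [] ∨ (seq.length : Int) = 1 then 0
  else
    let counter_seq := PySem.Dict.counter seq
    -- count_drop = 0 is dead in A; the loop takes the max of the counter's values
    let max_value := counter_seq.items.foldl
      (fun max_value kv => if kv.2 > max_value then kv.2 else max_value) 0
    (seq.length : Int) - max_value

-- ===== PORT B =====
-- state (best, run, prev); prev = none is the sentinel `object()`
def runStep (st : Int × Int × Option Int) (x : Int) : Int × Int × Option Int :=
  let run := if some x = st.2.2 then st.2.1 + 1 else 1
  let best := if run > st.1 then run else st.1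
  (best, run, some x)

def get_min_to_drop_alt (seq : List Int) : Int :=
  let s := PySem.List.sorted seq (fun x => x) false
  let st := s.foldl runStep (0, 0, none)
  (s.length : Int) - st.1

-- ===== PRECONDITION & SPEC =====
def Spec_get_min_to_drop (seq : List Int) (out : Int) : Prop := out = get_min_to_drop_alt seq
instance (seq : List Int) (out : Int) : Decidable (Spec_get_min_to_drop seq out) := by unfold Spec_get_min_to_drop; infer_instance

-- ===== CLAIM (what is proved, stated in full; the proofs are below) =====
def Claim_equal_get_min_to_drop : Prop := ∀ (seq : List Int), Dom_get_min_to_drop seq → Spec_get_min_to_drop seq (get_min_to_drop seq)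

-- ===== LEMMAS AND PROOFS =====

-- the max of the counts, folded over the whole list (duplicates do not change a max)
def maxCount (s : List Int) : Int := (s.map (fun x => ((s.count x : Nat) : Int))).foldl max 0

theorem step_eq (st : Int × Int × Option Int) (x : Int) :
    runStep st x = (max st.1 (if some x = st.2.2 then st.2.1 + 1 else 1),
                    (if some x = st.2.2 then st.2.1 + 1 else 1), some x) := by
  simp only [runStep, Prod.mk.injEq, and_true, max_def]
  split_ifs <;> omega

-- A's max-accumulating loop over pairs is a max-fold over the second components
theorem foldl_if_snd_eq_foldl_max (l : List (Int × Int)) (a : Int) :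
    l.foldl (fun m kv => if kv.2 > m then kv.2 else m) a = (l.map (·.2)).foldl max a := by
  induction l generalizing a with
  | nil => rfl
  | cons h t ih =>
    simp only [List.foldl_cons, List.map_cons, ih]
    congr 1
    omega

theorem foldl_max_init (l : List Int) (b c : Int) :
    l.foldl max (max b c) = max b (l.foldl max c) := by
  induction l generalizing c with
  | nil => rfl
  | cons h t ih => simp only [List.foldl_cons, max_assoc, ih]

theorem init_le_foldl_max (l : List Int) (a : Int) : a ≤ l.foldl max a := by
  induction l generalizing a with
  | nil => simp
  | cons h t ih => exact le_trans (le_max_left a h) (ih _)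

theorem le_foldl_max (l : List Int) (a x : Int) (hx : x ∈ l) : x ≤ l.foldl max a := by
  induction l generalizing a with
  | nil => cases hx
  | cons h t ih =>
    rcases List.mem_cons.mp hx with rfl | hx'
    · exact le_trans (le_max_right a x) (init_le_foldl_max t _)
    · exact ih (max a h) hx'

theorem foldl_max_le (l : List Int) (a m : Int) (ha : a ≤ m) (h : ∀ x ∈ l, x ≤ m) :
    l.foldl max a ≤ m := by
  induction l generalizing a with
  | nil => simpa
  | cons hd t ih =>
    exact ih _ (max_le ha (h hd List.mem_cons_self)) (fun x hx => h x (List.mem_cons_of_mem _ hx))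

theorem foldl_max_eq_of_mem_iff (l₁ l₂ : List Int) (h : ∀ x, x ∈ l₁ ↔ x ∈ l₂) :
    l₁.foldl max 0 = l₂.foldl max 0 := by
  apply le_antisymm
  · exact foldl_max_le _ _ _ (init_le_foldl_max _ _) (fun x hx => le_foldl_max _ _ _ ((h x).mp hx))
  · exact foldl_max_le _ _ _ (init_le_foldl_max _ _) (fun x hx => le_foldl_max _ _ _ ((h x).mpr hx))

theorem foldl_max_replicate (k : Nat) (b : Int) (hk : 1 ≤ k) (a : Int) (hab : a ≤ b) :
    (List.replicate k b).foldl max a = b := by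
  induction k generalizing a with
  | zero => omega
  | succ n ih =>
    simp only [List.replicate_succ, List.foldl_cons]
    rcases Nat.eq_zero_or_pos n with rfl | hn
    · simpa using max_eq_right hab
    · exact ih hn _ (max_le hab le_rfl)

-- fold over a block of k copies of a: run and best both reach k
theorem foldl_runStep_replicate (k : Nat) (a : Int) (j : Int) :
    (List.replicate k a).foldl runStep (j, j, some a) = (j + k, j + k, some a) := by
  induction k generalizing j with
  | zero => simp
  | succ n ih =>
    rw [List.replicate_succ, List.foldl_cons, step_eq]
    simp only [eq_self_iff_true, if_true]
    rw [max_eq_right (by omega), ih (j + 1)]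
    simp only [Prod.mk.injEq]
    refine ⟨by push_cast; omega, by push_cast; omega, trivial⟩

-- the best component of the scan is the max of the initial best and the scan from best 0
theorem foldl_runStep_best_max (l : List Int) (b r : Int) (p : Option Int) (hb : 0 ≤ b) :
    (l.foldl runStep (b, r, p)).1 = max b (l.foldl runStep (0, r, p)).1 := by
  suffices H : ∀ (l : List Int) (b c r : Int) (p : Option Int),
      (l.foldl runStep (max b c, r, p)).1 = max b (l.foldl runStep (c, r, p)).1 by
    have := H l b 0 r p
    rwa [max_eq_left hb] at this
  intro l
  induction l with
  | nil => intro b c r p; rfl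
  | cons x t ih =>
    intro b c r p
    simp only [List.foldl_cons, step_eq, max_assoc]
    exact ih b _ _ _

-- the scan ignores run/prev when the first element differs from prev
theorem foldl_runStep_reset (x : Int) (t : List Int) (b r₁ r₂ : Int) (p₁ p₂ : Option Int)
    (h₁ : p₁ ≠ some x) (h₂ : p₂ ≠ some x) :
    (x :: t).foldl runStep (b, r₁, p₁) = (x :: t).foldl runStep (b, r₂, p₂) := by
  simp only [List.foldl_cons, step_eq]
  rw [if_neg (Ne.symm h₁), if_neg (Ne.symm h₂)]

-- key lemma: on a sorted list the longest run is the max count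
theorem bestRun_eq_maxCount : ∀ (n : Nat) (t : List Int), t.length ≤ n →
    t.Pairwise (· ≤ ·) → (t.foldl runStep (0, 0, none)).1 = maxCount t := by
  intro n
  induction n with
  | zero =>
    intro t ht _
    have : t = [] := List.eq_nil_of_length_eq_zero (Nat.le_zero.mp ht)
    subst this; rfl
  | succ n ih =>
    intro t ht hsort
    rcases t with _ | ⟨a, t'⟩
    · rfl
    · -- split off the leading block of a's
      set tk := (a :: t').takeWhile (fun y => y == a) with htk
      set d := (a :: t').dropWhile (fun y => y == a) with hd
      have hsplit : tk ++ d = a :: t' := List.takeWhile_append_dropWhile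
      set k := tk.length with hk
      have hrep : tk = List.replicate k a := by
        apply List.eq_replicate_of_mem
        intro b hb
        have := List.mem_takeWhile_imp (htk ▸ hb)
        simpa using this
      have hk1 : 1 ≤ k := by
        have : (a :: t').takeWhile (fun y => y == a) = a :: (t'.takeWhile (fun y => y == a)) := by
          simp [List.takeWhile_cons]
        rw [hk, htk, this]
        simp
      have hdlen : d.length + k = t'.length + 1 := by
        have := congrArg List.length hsplit
        simp at this
        omega
      have hdsub : d.Sublist (a :: t') := hd ▸ List.dropWhile_sublist _
      have hdsort : d.Pairwise (· ≤ ·) := hsort.sublist hdsub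
      have hdnot : ∀ y ∈ d, y ≠ a := by
        intro y hy
        rcases hde : d with _ | ⟨b, rest⟩
        · rw [hde] at hy; cases hy
        · have hbne : b ≠ a := by
            have := List.head_dropWhile_not (fun y => y == a) (l := a :: t')
            rw [← hd] at *
            rw [hde] at this
            simpa using this (by simp)
          have hab : a ≤ b := by
            have hbmem : b ∈ a :: t' := hdsub.subset (hde ▸ List.mem_cons_self)
            rcases List.mem_cons.mp hbmem with h | h
            · omega
            · exact List.rel_of_pairwise_cons hsort h
          have halt : a < b := lt_of_le_of_ne hab (Ne.symm hbne)
          rw [hde] at hy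
          rcases List.mem_cons.mp hy with rfl | hy'
          · exact hbne
          · have : b ≤ y := List.rel_of_pairwise_cons (hde ▸ hdsort) hy'
            omega
      -- counts
      have h2a : d.count a = 0 := List.count_eq_zero.mpr (fun h => hdnot a h rfl)
      have hcnt_a : (a :: t').count a = k := by
        rw [← hsplit, List.count_append, hrep, List.count_replicate_self, h2a]
        omega
      have hcnt_ne : ∀ x ∈ d, (a :: t').count x = d.count x := by
        intro x hx
        have hxa : x ≠ a := hdnot x hx
        rw [← hsplit, List.count_append, hrep, List.count_replicate]
        simp only [beq_iff_eq]
        rw [if_neg (fun h => hxa h.symm)]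
        omega
      have hgen : ∀ f : Int → Int, (a :: t').map f = tk.map f ++ d.map f := by
        intro f; rw [← List.map_append, hsplit]
      -- maxCount recursion
      have hmc : maxCount (a :: t') = max (k : Int) (maxCount d) := by
        unfold maxCount
        rw [hgen, hrep, List.map_replicate, hcnt_a, List.foldl_append,
            foldl_max_replicate k ((k : Nat) : Int) hk1 0 (by positivity)]
        have hmapd : d.map (fun x => (((a :: t').count x : Nat) : Int))
            = d.map (fun x => ((d.count x : Nat) : Int)) :=
          List.map_congr_left (fun x hx => by rw [hcnt_ne x hx])
        rw [hmapd, ← foldl_max_init, max_eq_left (by positivity)]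
      -- bestRun recursion
      have hbr : ((a :: t').foldl runStep (0, 0, none)).1 = max (k : Int) (d.foldl runStep (0, 0, none)).1 := by
        conv_lhs => rw [← hsplit]
        rw [List.foldl_append, hrep]
        have hfirst : (List.replicate k a).foldl runStep (0, 0, none)
            = ((k : Int), (k : Int), some a) := by
          rcases k with _ | k'
          · omega
          · rw [List.replicate_succ, List.foldl_cons, step_eq]
            norm_num
            rw [foldl_runStep_replicate k' a 1]
            simp only [Prod.mk.injEq]
            refine ⟨by push_cast; omega, by push_cast; omega, trivial⟩
        rw [hfirst]
        rcases hde : d with _ | ⟨b, rest⟩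
        · simp [max_eq_left (show (0:Int) ≤ (k:Int) by positivity)]
        · have hbne : b ≠ a := hdnot b (hde ▸ List.mem_cons_self) 
          rw [foldl_runStep_reset b rest (k : Int) (k : Int) 0 (some a) none
              (by simpa using Ne.symm hbne) (by simp)]
          exact foldl_runStep_best_max (b :: rest) (k : Int) 0 none (by positivity)
      rw [hbr, hmc]
      congr 1
      have ht' : t'.length + 1 ≤ n + 1 := by simpa using ht
      exact ih d (by omega) hdsort

-- the two ports agree
theorem get_min_to_drop_eq (seq : List Int) :
    get_min_to_drop seq = get_min_to_drop_alt seq := by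
  unfold get_min_to_drop get_min_to_drop_alt
  have hperm : (PySem.List.sorted seq (fun x => x) false).Perm seq := PySem.List.sorted_perm _ _ _
  have hlen : (PySem.List.sorted seq (fun x => x) false).length = seq.length := hperm.length_eq
  have hbest : ((PySem.List.sorted seq (fun x => x) false).foldl runStep (0, 0, none)).1
      = maxCount (PySem.List.sorted seq (fun x => x) false) :=
    bestRun_eq_maxCount _ _ le_rfl (by simpa using PySem.List.sorted_pairwise seq (fun x => x))
  have hmc_perm : maxCount (PySem.List.sorted seq (fun x => x) false) = maxCount seq := by
    unfold maxCount
    apply foldl_max_eq_of_mem_iff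
    intro x
    constructor <;> intro hx <;> rcases List.mem_map.mp hx with ⟨y, hy, hyx⟩
    · exact List.mem_map.mpr ⟨y, hperm.mem_iff.mp hy, by rw [← hyx, hperm.count_eq]⟩
    · exact List.mem_map.mpr ⟨y, hperm.mem_iff.mpr hy, by rw [← hyx, hperm.count_eq]⟩
  rcases seq with _ | ⟨x, t⟩
  · rfl
  rcases t with _ | ⟨y, u⟩
  · -- single element: A returns 0; B computes 1 - 1 = 0
    have hs : PySem.List.sorted [x] (fun z : Int => z) false = [x] :=
      PySem.List.sorted_eq_self_of_pairwise [x] (fun z : Int => z) (by simp)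
    rw [if_pos (Or.inr (by simp))]
    simp [hs, runStep]
  · -- length ≥ 2
    have hne : (x :: y :: u) ≠ ([] : List Int) := by simp
    have hl1 : ((x :: y :: u).length : Int) ≠ 1 := by
      simp only [List.length_cons]; push_cast; omega
    rw [if_neg (not_or.mpr ⟨hne, hl1⟩)]
    dsimp only
    rw [hbest, hmc_perm, hlen]
    congr 1
    -- A's loop equals maxCount
    rw [PySem.Dict.items_counter, foldl_if_snd_eq_foldl_max, List.map_map]
    unfold maxCount
    apply foldl_max_eq_of_mem_iff
    intro z
    constructor <;> intro hz <;> rcases List.mem_map.mp hz with ⟨w, hw, hwz⟩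
    · exact List.mem_map.mpr ⟨w, (PySem.Set.mem_ofList _ _).mp hw, by simpa using hwz⟩
    · exact List.mem_map.mpr ⟨w, (PySem.Set.mem_ofList _ _).mpr hw, by simpa using hwz⟩

-- ===== VERDICT (by name: the statement is the Claim_ definition above) =====
theorem get_min_to_drop_spec : Claim_equal_get_min_to_drop := by
  intro seq _
  exact get_min_to_drop_eq seq
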